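-- pv_equiv track=rewrite | github.com/AndrewAltimit/template-repo | packages/sleeper_agents/examples/red_team_benchmark.py | generate_clean_texts
-- ===== SOURCE A (Python) =====
-- from typing import Any, Dict, List
--
-- def generate_clean_texts(n: int = 100) -> List[str]:
--     """Generate clean text samples."""
--     templates = [
--         "The weather today is pleasant and sunny.",
--         "Machine learning models require careful training.",
--         "Python is a versatile programming language.",
--         "Neural networks can learn complex patterns.",
--         "Data science combines statistics and computing.",
--         "The algorithm converged after several iterations.",
--         "Cloud computing enables scalable infrastructure.",
--         "Open source software promotes collaboration.",
--         "Artificial intelligence is advancing rapidly.",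
--         "Software engineering requires systematic thinking.",
--     ]
--     return [templates[i % len(templates)] for i in range(n)]
-- ===== SOURCE B (Python) =====
-- from typing import List
--
--
-- def generate_clean_texts(n: int = 100) -> List[str]:
--     """Generate clean text samples by repeated buffer doubling, then truncate."""
--     templates = [
--         "The weather today is pleasant and sunny.",
--         "Machine learning models require careful training.",
--         "Python is a versatile programming language.",
--         "Neural networks can learn complex patterns.",
--         "Data science combines statistics and computing.",
--         "The algorithm converged after several iterations.",
--         "Cloud computing enables scalable infrastructure.",
--         "Open source software promotes collaboration.",
--         "Artificial intelligence is advancing rapidly.",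
--         "Software engineering requires systematic thinking.",
--     ]
--     if n <= 0:
--         return []
--     buf = list(templates)
--     while len(buf) < n:
--         buf += buf
--     return buf[:n]
-- ===== Notes on version B (the rewrite author's own statement) =====
-- stated objective: alternative
-- what changed: Replaces per-element modular indexing over range(n) by an exponential buffer-doubling loop (buf += buf until len(buf) >= n) followed by one truncating slice.
import Mathlib
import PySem

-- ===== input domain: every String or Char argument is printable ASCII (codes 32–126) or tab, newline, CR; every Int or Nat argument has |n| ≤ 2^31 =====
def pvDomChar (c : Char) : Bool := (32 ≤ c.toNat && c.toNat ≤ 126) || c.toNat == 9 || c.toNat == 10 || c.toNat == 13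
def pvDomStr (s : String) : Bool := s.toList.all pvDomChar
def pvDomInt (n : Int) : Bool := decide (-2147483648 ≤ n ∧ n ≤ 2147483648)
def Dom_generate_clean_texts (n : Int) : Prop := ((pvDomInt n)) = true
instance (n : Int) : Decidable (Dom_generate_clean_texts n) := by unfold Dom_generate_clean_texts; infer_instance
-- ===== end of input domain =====

-- B replaces A's per-element modular indexing by an exponential buffer-doubling loop plus one
-- truncating slice; same asymptotic cost, different construction.

-- the shared literal template list (pure data, used by both ports)
def cleanTemplates : List String := [
  "The weather today is pleasant and sunny.",
  "Machine learning models require careful training.",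
  "Python is a versatile programming language.",
  "Neural networks can learn complex patterns.",
  "Data science combines statistics and computing.",
  "The algorithm converged after several iterations.",
  "Cloud computing enables scalable infrastructure.",
  "Open source software promotes collaboration.",
  "Artificial intelligence is advancing rapidly.",
  "Software engineering requires systematic thinking."]

-- ===== PORT A =====
-- [templates[i % len(templates)] for i in range(n)]
def generate_clean_texts (n : Int) : List String :=
  (PySem.List.pyRange 0 n 1).map (fun i =>
    PySem.List.pyGetD cleanTemplates (PySem.Int.mod i (cleanTemplates.length : Int)) "")

-- ===== PORT B =====
-- while len(buf) < n: buf += buf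
def growClean (n : Int) (buf : List String) (h : buf ≠ []) : List String :=
  if _h' : (buf.length : Int) < n then
    growClean n (buf ++ buf) (by simp [h])
  else buf
termination_by n.toNat - buf.length
decreasing_by
  have hp : 0 < buf.length := List.length_pos_iff.mpr h
  simp only [List.length_append]
  omega

-- if n <= 0: []  else  buf = templates; while len(buf) < n: buf += buf;  buf[:n]
def generate_clean_texts_alt (n : Int) : List String :=
  if n ≤ 0 then []
  else PySem.List.slice (growClean n cleanTemplates (by decide)) none (some n)

-- ===== PRECONDITION & SPEC =====
def Spec_generate_clean_texts (n : Int) (out : List String) : Prop := out = generate_clean_texts_alt n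
instance (n : Int) (out : List String) : Decidable (Spec_generate_clean_texts n out) := by unfold Spec_generate_clean_texts; infer_instance

-- ===== CLAIM (what is proved, stated in full; the proofs are below) =====
def Claim_equal_generate_clean_texts : Prop := ∀ (n : Int), Dom_generate_clean_texts n → Spec_generate_clean_texts n (generate_clean_texts n)

-- ===== LEMMAS AND PROOFS =====

theorem growClean_congr (n : Int) (b1 b2 : List String) (h1 : b1 ≠ []) (h2 : b2 ≠ [])
    (he : b1 = b2) : growClean n b1 h1 = growClean n b2 h2 := by
  subst he; rfl

theorem flatten_replicate_ne_nil (m : Nat) (hm : 0 < m) :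
    List.flatten (List.replicate m cleanTemplates) ≠ [] := by
  cases m with
  | zero => omega
  | succ k => simp [List.replicate_succ, List.flatten_cons, cleanTemplates]

theorem length_flatten_replicate (m : Nat) :
    (List.flatten (List.replicate m cleanTemplates)).length = m * 10 := by
  induction m with
  | zero => simp
  | succ k ih =>
    rw [List.replicate_succ, List.flatten_cons, List.length_append, ih]
    simp [cleanTemplates]; ring

-- the doubling loop stays inside the "c concatenated copies of the templates" shape
-- and stops only once its length is at least n
theorem growClean_spec (n : Int) (m : Nat) (hm : 0 < m) :
    ∃ c : Nat, 0 < c ∧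
      growClean n (List.flatten (List.replicate m cleanTemplates)) (flatten_replicate_ne_nil m hm)
        = List.flatten (List.replicate c cleanTemplates) ∧ n ≤ ((c * 10 : Nat) : Int) := by
  rw [growClean]
  split
  · rename_i hlt
    obtain ⟨c, hc, heq, hn⟩ := growClean_spec n (m + m) (by omega)
    refine ⟨c, hc, ?_, hn⟩
    rw [← heq]
    exact growClean_congr n _ _ _ _ (by rw [List.replicate_add, List.flatten_append])
  · rename_i hge
    refine ⟨m, hm, rfl, ?_⟩
    rw [length_flatten_replicate] at hge
    omega
termination_by n.toNat - m * 10
decreasing_by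
  rename_i hlt
  rw [length_flatten_replicate] at hlt
  omega

-- element j of c concatenated copies of ts is ts[j % ts.length]
theorem getElem?_flatten_replicate {α : Type} (ts : List α) (c j : Nat)
    (_hlen : 0 < ts.length) (hj : j < c * ts.length) :
    (List.flatten (List.replicate c ts))[j]? = ts[j % ts.length]? := by
  induction c generalizing j with
  | zero => omega
  | succ c ih =>
    rw [List.replicate_succ, List.flatten_cons]
    by_cases h : j < ts.length
    · rw [List.getElem?_append_left h, Nat.mod_eq_of_lt h]
    · have h' : ts.length ≤ j := Nat.le_of_not_lt h
      rw [List.getElem?_append_right h']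
      have hmul : (c + 1) * ts.length = ts.length + c * ts.length := by ring
      rw [ih (j - ts.length) (by omega)]
      congr 1
      conv_rhs => rw [show j = ts.length + (j - ts.length) by omega]
      rw [Nat.add_mod_left]

theorem map_mod_eq_take_flatten {α : Type} (ts : List α) (d : α) (m c : Nat)
    (hlen : 0 < ts.length) (hc : m ≤ c * ts.length) :
    (List.range m).map (fun k => PySem.List.pyGetD ts (PySem.Int.mod ((k : Nat) : Int) (ts.length : Int)) d)
      = (List.flatten (List.replicate c ts)).take m := by
  apply List.ext_getElem?
  intro j
  by_cases hj : j < m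
  · rw [List.getElem?_take_of_lt hj, getElem?_flatten_replicate ts c j hlen (by omega)]
    simp only [List.getElem?_map, List.getElem?_range hj, Option.map_some]
    rw [PySem.Int.mod_natCast, PySem.List.pyGetD_natCast]
    rw [List.getD_eq_getElem?_getD, List.getElem?_eq_getElem (Nat.mod_lt _ hlen)]
    simp
  · rw [List.getElem?_eq_none (by simp; omega), List.getElem?_eq_none (by simp; omega)]

-- ===== VERDICT (by name: the statement is the Claim_ definition above) =====
theorem generate_clean_texts_spec : Claim_equal_generate_clean_texts := by
  intro n _
  unfold Spec_generate_clean_texts generate_clean_texts generate_clean_texts_alt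
  by_cases hn : n ≤ 0
  · rw [if_pos hn, PySem.List.pyRange_one_eq_nil hn, List.map_nil]
  · rw [if_neg hn]
    replace hn : 0 < n := by omega
    have hstart : cleanTemplates = List.flatten (List.replicate 1 cleanTemplates) := by
      simp
    obtain ⟨c, hc, heq, hcn⟩ := growClean_spec n 1 (by omega)
    have hgrow : growClean n cleanTemplates (by decide)
        = List.flatten (List.replicate c cleanTemplates) := by
      rw [growClean_congr n cleanTemplates (List.flatten (List.replicate 1 cleanTemplates))
        (by decide) (flatten_replicate_ne_nil 1 (by omega)) (by simp)]
      exact heq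
    rw [hgrow, PySem.List.slice_to _ (le_of_lt hn), PySem.List.pyRange_one]
    simp only [sub_zero, zero_add]
    rw [List.map_map]
    simp only [Function.comp_def]
    rw [map_mod_eq_take_flatten cleanTemplates "" n.toNat c (by decide)
      (by have : cleanTemplates.length = 10 := by decide
          rw [this]; omega)]
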